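-- pv_equiv track=rewrite | github.com/peitianyu/c51cc | scripts/c89ify.py | convert_line_comments
-- ===== SOURCE A (Python) =====
-- def convert_line_comments(src: str) -> str:
--     """把 // ... 注释转换为 /* ... */，但不处理字符串/字符常量内的 //"""
--     result = []
--     i = 0
--     n = len(src)
--     while i < n:
--         # 块注释直接透传
--         if src[i : i + 2] == "/*":
--             end = src.find("*/", i + 2)
--             if end == -1:
--                 result.append(src[i:])
--                 break
--             result.append(src[i : end + 2])
--             i = end + 2
--         # 字符串字面量
--         elif src[i] == '"':
--             j = i + 1
--             while j < n:
--                 if src[j] == "\\":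
--                     j += 2
--                 elif src[j] == '"':
--                     j += 1
--                     break
--                 else:
--                     j += 1
--             result.append(src[i:j])
--             i = j
--         # 字符常量
--         elif src[i] == "'":
--             j = i + 1
--             while j < n:
--                 if src[j] == "\\":
--                     j += 2
--                 elif src[j] == "'":
--                     j += 1
--                     break
--                 else:
--                     j += 1
--             result.append(src[i:j])
--             i = j
--         # 单行注释
--         elif src[i : i + 2] == "//":
--             end = src.find("\n", i)
--             comment_text = (
--                 src[i + 2 : end].rstrip() if end != -1 else src[i + 2 :].rstrip()
--             )
--             # 如果注释内容含 */ 则替换掉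
--             comment_text = comment_text.replace("*/", "* /")
--             result.append("/*" + comment_text + " */")
--             if end != -1:
--                 result.append("\n")
--                 i = end + 1
--             else:
--                 break
--         else:
--             result.append(src[i])
--             i += 1
--     return "".join(result)
-- ===== SOURCE B (Python) =====
-- def convert_line_comments(src: str) -> str:
--     """把 // ... 注释转换为 /* ... */，但不处理字符串/字符常量内的 //"""
--     CODE, SLASH, BLOCK, BLOCK_STAR, STR, STR_ESC, CHR, CHR_ESC, LINE = range(9)
--     out = []
--     buf = []
--     state = CODE
--
--     def emit_line_comment():
--         body = "".join(buf).rstrip().replace("*/", "* /")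
--         out.append("/*" + body + " */")
--
--     for ch in src:
--         if state == SLASH and ch != "*" and ch != "/":
--             out.append("/")
--             state = CODE
--         if state == CODE:
--             if ch == "/":
--                 state = SLASH
--             else:
--                 out.append(ch)
--                 if ch == '"':
--                     state = STR
--                 elif ch == "'":
--                     state = CHR
--         elif state == SLASH:
--             if ch == "*":
--                 out.append("/*")
--                 state = BLOCK
--             else:  # ch == "/"
--                 buf = []
--                 state = LINE
--         elif state == BLOCK:
--             out.append(ch)
--             if ch == "*":
--                 state = BLOCK_STAR
--         elif state == BLOCK_STAR:
--             out.append(ch)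
--             if ch == "/":
--                 state = CODE
--             elif ch != "*":
--                 state = BLOCK
--         elif state == STR:
--             out.append(ch)
--             if ch == "\\":
--                 state = STR_ESC
--             elif ch == '"':
--                 state = CODE
--         elif state == STR_ESC:
--             out.append(ch)
--             state = STR
--         elif state == CHR:
--             out.append(ch)
--             if ch == "\\":
--                 state = CHR_ESC
--             elif ch == "'":
--                 state = CODE
--         elif state == CHR_ESC:
--             out.append(ch)
--             state = CHR
--         else:  # LINE
--             if ch == "\n":
--                 emit_line_comment()
--                 out.append("\n")
--                 state = CODE
--             else:
--                 buf.append(ch)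
--     if state == SLASH:
--         out.append("/")
--     elif state == LINE:
--         emit_line_comment()
--     return "".join(out)
-- ===== Notes on version B (the rewrite author's own statement) =====
-- stated objective: alternative
-- what changed: Replaced A's index-walking scanner (nested while loops, str.find and slicing) by a single-pass 9-state character DFA (code/slash/block/block-star/string/string-escape/char/char-escape/line-comment) that folds once over the characters with an output accumulator and a line-comment buffer, finalizing pending state at EOF.
import Mathlib
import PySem

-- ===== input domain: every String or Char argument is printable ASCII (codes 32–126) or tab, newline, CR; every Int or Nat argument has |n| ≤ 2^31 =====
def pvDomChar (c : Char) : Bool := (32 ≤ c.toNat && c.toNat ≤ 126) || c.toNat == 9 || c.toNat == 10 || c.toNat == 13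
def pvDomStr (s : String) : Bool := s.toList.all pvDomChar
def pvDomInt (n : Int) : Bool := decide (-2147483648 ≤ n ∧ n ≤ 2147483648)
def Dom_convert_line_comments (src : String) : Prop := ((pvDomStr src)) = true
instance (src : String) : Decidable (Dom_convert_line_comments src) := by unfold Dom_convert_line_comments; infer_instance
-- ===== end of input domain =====

-- B replaces A's index-walking scanner (nested while loops, str.find, slicing) by a
-- single-pass 9-state character DFA folded over the characters (objective: alternative).

-- ===== PORT A =====
-- inner while loop of the string/char branches: while j < n: '\\' → j+2, quote → j+1 break, else j+1
def scanQuote (src : List Char) (q : Char) (j : Nat) : Nat :=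
  if hj : j < src.length then
    if src[j] = '\\' then scanQuote src q (j + 2)
    else if src[j] = q then j + 1
    else scanQuote src q (j + 1)
  else j
termination_by src.length - j

-- facts about A's helpers needed for goA's termination (cited in decreasing_by)
theorem le_scanQuote (src : List Char) (q : Char) (j : Nat) : j ≤ scanQuote src q j := by
  fun_induction scanQuote src q j <;> omega

def goA (src : List Char) (i : Nat) (result : List (List Char)) : List (List Char) :=
  if hi : i < src.length then
    -- 块注释直接透传
    if hb : PySem.Chars.slice src (some (i : Int)) (some ((i : Int) + 2)) = ['/', '*'] then
      let e := PySem.Chars.findFrom src ['*', '/'] ((i : Int) + 2) none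
      if he : e = -1 then result ++ [src.drop i]
      else goA src (e.toNat + 2) (result ++ [PySem.Chars.slice src (some (i : Int)) (some (e + 2))])
    -- 字符串字面量
    else if src[i] = '"' then
      let j := scanQuote src '"' (i + 1)
      goA src j (result ++ [PySem.Chars.slice src (some (i : Int)) (some (j : Int))])
    -- 字符常量
    else if src[i] = '\'' then
      let j := scanQuote src '\'' (i + 1)
      goA src j (result ++ [PySem.Chars.slice src (some (i : Int)) (some (j : Int))])
    -- 单行注释
    else if hl : PySem.Chars.slice src (some (i : Int)) (some ((i : Int) + 2)) = ['/', '/'] then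
      let e := PySem.Chars.findFrom src ['\n'] (i : Int) none
      let ct0 := if e ≠ -1 then PySem.Chars.rstrip (PySem.Chars.slice src (some ((i : Int) + 2)) (some e))
                 else PySem.Chars.rstrip (PySem.Chars.slice src (some ((i : Int) + 2)) none)
      let ct := PySem.Chars.replace ct0 ['*', '/'] ['*', ' ', '/']
      if he : e ≠ -1 then
        goA src (e.toNat + 1) (result ++ [['/', '*'] ++ ct ++ [' ', '*', '/'], ['\n']])
      else result ++ [['/', '*'] ++ ct ++ [' ', '*', '/']]
    else goA src (i + 1) (result ++ [[src[i]]])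
  else result
termination_by src.length - i
decreasing_by
  · have h2 : i + 2 ≤ src.length := by
      have h := hb
      rw [PySem.Chars.slice_eq_listSlice,
        show ((i : Int) + 2) = ((i + 2 : Nat) : Int) by push_cast; ring,
        PySem.List.slice_natCast] at h
      have hl := congrArg List.length h
      simp [List.length_take, List.length_drop] at hl
      omega
    have hspec := PySem.Chars.findFrom_natCast_spec src ['*', '/'] (i + 2) h2 (by
      rw [show ((i + 2 : Nat) : Int) = ((i : Int) + 2) by push_cast; ring]; exact he)
    rw [show ((i + 2 : Nat) : Int) = ((i : Int) + 2) by push_cast; ring] at hspec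
    omega
  · have := le_scanQuote src '"' (i + 1); omega
  · have := le_scanQuote src '\'' (i + 1); omega
  · have hspec := PySem.Chars.findFrom_natCast_spec src ['\n'] i (by omega) he
    omega
  · omega

def convert_line_comments (src : String) : String :=
  String.ofList (PySem.Chars.join [] (goA src.toList 0 []))

-- ===== PORT B =====
inductive BSt : Type
  | code | slash | block | blockStar | instr | strEsc | inchr | chrEsc | line
deriving DecidableEq, Repr

structure BAcc where
  out : List Char
  buf : List Char
  st : BSt
deriving DecidableEq, Repr

-- body = "".join(buf).rstrip().replace("*/", "* /"); out.append("/*" + body + " */")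
def emitLine (buf : List Char) : List Char :=
  ['/', '*'] ++ PySem.Chars.replace (PySem.Chars.rstrip buf) ['*', '/'] ['*', ' ', '/'] ++ [' ', '*', '/']

-- the CODE-state dispatch (also reached from SLASH after emitting the pending '/')
def codeStep (out buf : List Char) (c : Char) : BAcc :=
  if c = '/' then ⟨out, buf, .slash⟩
  else if c = '"' then ⟨out ++ [c], buf, .instr⟩
  else if c = '\'' then ⟨out ++ [c], buf, .inchr⟩
  else ⟨out ++ [c], buf, .code⟩

def stepB (a : BAcc) (c : Char) : BAcc :=
  match a.st with
  | .code => codeStep a.out a.buf c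
  | .slash =>
      if c = '*' then ⟨a.out ++ ['/', '*'], a.buf, .block⟩
      else if c = '/' then ⟨a.out, [], .line⟩
      else codeStep (a.out ++ ['/']) a.buf c
  | .block => if c = '*' then ⟨a.out ++ [c], a.buf, .blockStar⟩ else ⟨a.out ++ [c], a.buf, .block⟩
  | .blockStar =>
      if c = '/' then ⟨a.out ++ [c], a.buf, .code⟩
      else if c = '*' then ⟨a.out ++ [c], a.buf, .blockStar⟩
      else ⟨a.out ++ [c], a.buf, .block⟩
  | .instr =>
      if c = '\\' then ⟨a.out ++ [c], a.buf, .strEsc⟩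
      else if c = '"' then ⟨a.out ++ [c], a.buf, .code⟩
      else ⟨a.out ++ [c], a.buf, .instr⟩
  | .strEsc => ⟨a.out ++ [c], a.buf, .instr⟩
  | .inchr =>
      if c = '\\' then ⟨a.out ++ [c], a.buf, .chrEsc⟩
      else if c = '\'' then ⟨a.out ++ [c], a.buf, .code⟩
      else ⟨a.out ++ [c], a.buf, .inchr⟩
  | .chrEsc => ⟨a.out ++ [c], a.buf, .inchr⟩
  | .line =>
      if c = '\n' then ⟨a.out ++ emitLine a.buf ++ ['\n'], a.buf, .code⟩
      else ⟨a.out, a.buf ++ [c], .line⟩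

def finishB (a : BAcc) : List Char :=
  if a.st = .slash then a.out ++ ['/']
  else if a.st = .line then a.out ++ emitLine a.buf
  else a.out

def convert_line_comments_alt (src : String) : String :=
  String.ofList (finishB (src.toList.foldl stepB ⟨[], [], .code⟩))

-- ===== PRECONDITION & SPEC =====
def Spec_convert_line_comments (src : String) (out : String) : Prop := out = convert_line_comments_alt src
instance (src : String) (out : String) : Decidable (Spec_convert_line_comments src out) := by unfold Spec_convert_line_comments; infer_instance

-- ===== CLAIM (what is proved, stated in full; the proofs are below) =====
def Claim_equal_convert_line_comments : Prop := ∀ (src : String), Dom_convert_line_comments src → Spec_convert_line_comments src (convert_line_comments src)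

-- ===== LEMMAS AND PROOFS =====

theorem join_nil_eq_flatten (l : List (List Char)) : PySem.Chars.join [] l = l.flatten := by
  induction l with
  | nil => rfl
  | cons a t ih =>
    cases t with
    | nil => simp [PySem.Chars.join, List.intercalate]
    | cons b t' =>
      simp only [PySem.Chars.join, List.intercalate] at *
      simp [List.intersperse] at *
      simp [ih]

-- src[i:i+2] = [c, d] pins the two characters at i and the room for them
theorem slice2 (src : List Char) (i : Nat) (c d : Char)
    (h : PySem.Chars.slice src (some (i : Int)) (some ((i : Int) + 2)) = [c, d]) :
    i + 2 ≤ src.length ∧ src.drop i = c :: d :: src.drop (i + 2) := by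
  rw [PySem.Chars.slice_eq_listSlice,
    show ((i : Int) + 2) = ((i + 2 : Nat) : Int) by push_cast; ring,
    PySem.List.slice_natCast] at h
  have hl := congrArg List.length h
  simp [List.length_take, List.length_drop] at hl
  have hlen : i + 2 ≤ src.length := by omega
  refine ⟨hlen, ?_⟩
  have : src.drop i = (src.drop i).take (i + 2 - i) ++ (src.drop i).drop (i + 2 - i) := by
    rw [List.take_append_drop]
  rw [this, h]
  simp [List.drop_drop]

-- Nat-level reading of a successful str.find(sub, k)
theorem findFrom_found (src sub : List Char) (k : Nat) (hk : k ≤ src.length)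
    (he : PySem.Chars.findFrom src sub (k : Int) none ≠ -1)
    (m : Nat) (hm : m = (PySem.Chars.findFrom src sub (k : Int) none).toNat) :
    k ≤ m ∧ m + sub.length ≤ src.length ∧
      src.drop m = sub ++ src.drop (m + sub.length) ∧
      ∀ j, k ≤ j → j < m → ¬ sub <+: src.drop j := by
  have hspec := PySem.Chars.findFrom_natCast_spec src sub k hk he
  obtain ⟨h1, h2, h3⟩ := hspec
  rw [← hm] at h2 h3
  have hmle : k ≤ m := by omega
  refine ⟨hmle, ?_, ?_, ?_⟩
  · have := h2.length_le
    simp [List.length_drop] at this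
    have hms : m ≤ src.length := by
      have h4 := PySem.Chars.findFrom_natCast src sub k hk
      by_cases hq : PySem.Chars.find (src.drop k) sub = -1
      · simp [h4, hq] at he
      · have h5 := PySem.Chars.find_le_length (s := src.drop k) (sub := sub)
        have h6 := PySem.Chars.neg_one_le_find (s := src.drop k) (sub := sub)
        rw [h4, if_neg hq] at hm
        simp [List.length_drop] at h5
        omega
    omega
  · obtain ⟨t, ht⟩ := h2
    have : t = (src.drop m).drop sub.length := by rw [← ht]; simp
    rw [← ht, this]
    simp [List.drop_drop]
  · intro j hkj hjm
    exact h3 j hkj hjm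

theorem findFrom_not_found (src sub : List Char) (k : Nat) (hk : k ≤ src.length)
    (he : PySem.Chars.findFrom src sub (k : Int) none = -1) :
    ¬ sub <:+: src.drop k := by
  exact (PySem.Chars.findFrom_natCast_eq_neg_one_iff src sub k hk).mp he

theorem goA_accAux (src : List Char) (k : Nat) : ∀ i res, src.length - i ≤ k →
    goA src i res = res ++ goA src i [] := by
  induction k with
  | zero =>
    intro i res h
    have hi : ¬ i < src.length := by omega
    conv_lhs => rw [goA]
    conv_rhs => rw [goA]
    rw [dif_neg hi, dif_neg hi]
    simp
  | succ k ih =>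
    intro i res h
    by_cases hi : i < src.length
    swap
    · conv_lhs => rw [goA]
      conv_rhs => rw [goA]
      rw [dif_neg hi, dif_neg hi]
      simp
    have hcast : ((i : Int) + 2) = ((i + 2 : Nat) : Int) := by push_cast; ring
    conv_lhs => rw [goA]
    conv_rhs => rw [goA]
    rw [dif_pos hi, dif_pos hi]
    by_cases hb : PySem.Chars.slice src (some (i : Int)) (some ((i : Int) + 2)) = ['/', '*']
    · simp only [dif_pos hb]
      by_cases he : PySem.Chars.findFrom src ['*', '/'] ((i : Int) + 2) none = -1
      · simp [he]
      · have h2 := (slice2 src i '/' '*' hb).1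
        have hf := findFrom_found src ['*', '/'] (i + 2) h2 (by rw [← hcast]; exact he) _ rfl
        rw [← hcast] at hf
        rw [dif_neg he, dif_neg he,
          ih ((PySem.Chars.findFrom src ['*', '/'] ((i : Int) + 2) none).toNat + 2) _ (by omega),
          ih ((PySem.Chars.findFrom src ['*', '/'] ((i : Int) + 2) none).toNat + 2)
            ([] ++ [PySem.Chars.slice src (some (i : Int))
              (some (PySem.Chars.findFrom src ['*', '/'] ((i : Int) + 2) none + 2))]) (by omega)]
        simp
    · simp only [dif_neg hb]
      by_cases hq : src[i] = '"'
      · simp only [if_pos hq]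
        have := le_scanQuote src '"' (i + 1)
        rw [ih (scanQuote src '"' (i + 1)) _ (by omega),
          ih (scanQuote src '"' (i + 1))
            ([] ++ [PySem.Chars.slice src (some (i : Int)) (some ((scanQuote src '"' (i + 1) : Nat) : Int))]) (by omega)]
        simp
      · simp only [if_neg hq]
        by_cases hq' : src[i] = '\''
        · simp only [if_pos hq']
          have := le_scanQuote src '\'' (i + 1)
          rw [ih (scanQuote src '\'' (i + 1)) _ (by omega),
            ih (scanQuote src '\'' (i + 1))
              ([] ++ [PySem.Chars.slice src (some (i : Int)) (some ((scanQuote src '\'' (i + 1) : Nat) : Int))]) (by omega)]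
          simp
        · simp only [if_neg hq']
          by_cases hl : PySem.Chars.slice src (some (i : Int)) (some ((i : Int) + 2)) = ['/', '/']
          · simp only [dif_pos hl]
            by_cases hn : PySem.Chars.findFrom src ['\n'] (i : Int) none = -1
            · simp [hn]
            · have hf := findFrom_found src ['\n'] i (by omega) hn _ rfl
              simp only [if_pos hn, dif_pos hn]
              rw [ih ((PySem.Chars.findFrom src ['\n'] (i : Int) none).toNat + 1) _ (by omega),
                ih ((PySem.Chars.findFrom src ['\n'] (i : Int) none).toNat + 1) ([] ++ _) (by omega)]
              simp
          · simp only [dif_neg hl]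
            rw [ih (i + 1) _ (by omega), ih (i + 1) ([] ++ [[src[i]]]) (by omega)]
            simp

theorem goA_acc (src : List Char) (i : Nat) (res : List (List Char)) :
    goA src i res = res ++ goA src i [] :=
  goA_accAux src (src.length - i) i res le_rfl

-- no occurrence of sub strictly before position m ⇒ sub is not an infix of src[lo:m]
theorem no_infix_take (sub src : List Char) (lo m : Nat)
    (hmin : ∀ j, lo ≤ j → j < m → ¬ sub <+: src.drop j) (hsub : sub ≠ []) :
    ¬ sub <:+: (src.drop lo).take (m - lo) := by
  intro hinf
  obtain ⟨s, t, hst⟩ := hinf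
  have hpre : sub <+: ((src.drop lo).take (m - lo)).drop s.length := by
    rw [← hst, List.append_assoc, List.drop_left]
    exact ⟨t, rfl⟩
  rw [List.drop_take, List.drop_drop] at hpre
  have hpre2 := (List.prefix_take_iff).mp hpre
  have hlen : 1 ≤ sub.length := List.length_pos_iff.mpr hsub
  have hlt : lo + s.length < m := by omega
  exact hmin (lo + s.length) (by omega) hlt hpre2.1

-- the automaton copies a block-comment body (free of "*/") verbatim
theorem blockRun : ∀ (l out buf : List Char) (st : BSt),
    (st = BSt.block ∧ ¬ ['*', '/'] <:+: l ∨ st = BSt.blockStar ∧ ¬ ['*', '/'] <:+: ('*' :: l)) →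
    ∃ st', (st' = BSt.block ∨ st' = BSt.blockStar) ∧
      List.foldl stepB ⟨out, buf, st⟩ l = ⟨out ++ l, buf, st'⟩ := by
  intro l
  induction l with
  | nil =>
    intro out buf st hst
    rcases hst with ⟨rfl, -⟩ | ⟨rfl, -⟩
    · exact ⟨.block, Or.inl rfl, by simp⟩
    · exact ⟨.blockStar, Or.inr rfl, by simp⟩
  | cons c l ih =>
    intro out buf st hst
    rcases hst with ⟨rfl, hni⟩ | ⟨rfl, hni⟩
    · by_cases hc : c = '*'
      · subst hc
        obtain ⟨st', h1, h2⟩ := ih (out ++ ['*']) buf .blockStar (Or.inr ⟨rfl, hni⟩)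
        exact ⟨st', h1, by simpa [stepB, List.append_assoc] using h2⟩
      · obtain ⟨st', h1, h2⟩ := ih (out ++ [c]) buf .block
          (Or.inl ⟨rfl, fun hx => hni (List.infix_cons hx)⟩)
        exact ⟨st', h1, by simpa [stepB, hc, List.append_assoc] using h2⟩
    · by_cases hc : c = '/'
      · exact absurd ⟨[], l, by simp [hc]⟩ hni
      · by_cases hc2 : c = '*'
        · subst hc2
          obtain ⟨st', h1, h2⟩ := ih (out ++ ['*']) buf .blockStar
            (Or.inr ⟨rfl, fun hx => hni (List.infix_cons hx)⟩)
          exact ⟨st', h1, by simpa [stepB, List.append_assoc] using h2⟩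
        · obtain ⟨st', h1, h2⟩ := ih (out ++ [c]) buf .block
            (Or.inl ⟨rfl, fun hx => hni (List.infix_cons (List.infix_cons hx))⟩)
          exact ⟨st', h1, by simpa [stepB, hc, hc2, List.append_assoc] using h2⟩

-- the automaton buffers a line-comment body (free of newlines)
theorem lineRun : ∀ (l : List Char), '\n' ∉ l → ∀ (out buf : List Char),
    List.foldl stepB ⟨out, buf, .line⟩ l = ⟨out, buf ++ l, .line⟩ := by
  intro l
  induction l with
  | nil => intro _ out buf; simp
  | cons c l ih =>
    intro hmem out buf
    have hc : ¬ c = '\n' := fun h => hmem (h ▸ List.mem_cons_self)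
    simp only [List.foldl_cons, stepB, if_neg hc]
    rw [ih (fun h => hmem (List.mem_cons_of_mem _ h)) out (buf ++ [c])]
    simp

-- number of characters A's quote scanner consumes after the opening quote, as a list recursion
def splitQ (q : Char) : List Char → Nat
  | [] => 0
  | c :: l =>
    if c = '\\' then
      match l with
      | [] => 2
      | _ :: l' => 2 + splitQ q l'
    else if c = q then 1
    else 1 + splitQ q l

theorem splitQ_bs_nil (q : Char) : splitQ q ['\\'] = 2 := rfl
theorem splitQ_bs_cons (q d : Char) (l : List Char) :
    splitQ q ('\\' :: d :: l) = 2 + splitQ q l := rfl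
theorem splitQ_quote (q : Char) (l : List Char) (h : q ≠ '\\') : splitQ q (q :: l) = 1 := by
  rw [splitQ.eq_def]; simp [h]
theorem splitQ_other (q c : Char) (l : List Char) (h1 : c ≠ '\\') (h2 : c ≠ q) :
    splitQ q (c :: l) = 1 + splitQ q l := by
  rw [splitQ.eq_def]; simp [h1, h2]

theorem scanQuote_eq (src : List Char) (q : Char) (k : Nat) : ∀ j, src.length - j ≤ k →
    scanQuote src q j = j + splitQ q (src.drop j) := by
  induction k with
  | zero =>
    intro j h
    rw [scanQuote, dif_neg (by omega), List.drop_eq_nil_of_le (by omega)]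
    simp [splitQ]
  | succ k ih =>
    intro j h
    by_cases hj : j < src.length
    swap
    · rw [scanQuote, dif_neg hj, List.drop_eq_nil_of_le (by omega)]
      simp [splitQ]
    rw [scanQuote, dif_pos hj]
    have hd : src.drop j = src[j] :: src.drop (j + 1) := List.drop_eq_getElem_cons hj
    by_cases h1 : src[j] = '\\'
    · rw [if_pos h1]
      by_cases hj1 : j + 1 < src.length
      · have hd1 : src.drop (j + 1) = src[j + 1] :: src.drop (j + 2) :=
          List.drop_eq_getElem_cons hj1
        rw [ih (j + 2) (by omega), hd, hd1, h1, splitQ_bs_cons]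
        omega
      · have hnil : src.drop (j + 1) = [] := List.drop_eq_nil_of_le (by omega)
        rw [scanQuote, dif_neg (by omega), hd, hnil, h1, splitQ_bs_nil]
    · rw [if_neg h1]
      by_cases h2 : src[j] = q
      · have hq2 : q ≠ '\\' := by rw [← h2]; exact h1
        rw [if_pos h2, hd, h2, splitQ_quote q _ hq2]
      · rw [if_neg h2, ih (j + 1) (by omega), hd, splitQ_other q _ _ h1 h2]
        omega

-- the automaton copies a quoted literal verbatim and either hits EOF or returns to code
theorem qRun (q : Char) (inQ escQ : BSt)
    (hq : q = '"' ∧ inQ = .instr ∧ escQ = .strEsc ∨ q = '\'' ∧ inQ = .inchr ∧ escQ = .chrEsc) :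
    ∀ (l out buf : List Char),
      (l.length ≤ splitQ q l ∧ ∃ st', (st' = inQ ∨ st' = escQ) ∧
          List.foldl stepB ⟨out, buf, inQ⟩ l = ⟨out ++ l, buf, st'⟩)
      ∨ (List.foldl stepB ⟨out, buf, inQ⟩ l
          = List.foldl stepB ⟨out ++ l.take (splitQ q l), buf, .code⟩ (l.drop (splitQ q l))) := by
  have hq' : q ≠ '\\' := by rcases hq with ⟨rfl, -, -⟩ | ⟨rfl, -, -⟩ <;> decide
  have hstepEsc : ∀ out buf c, stepB ⟨out, buf, escQ⟩ c = ⟨out ++ [c], buf, inQ⟩ := by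
    rcases hq with ⟨-, rfl, rfl⟩ | ⟨-, rfl, rfl⟩ <;> intro out buf c <;> rfl
  have hstepIn : ∀ out buf c, c ≠ '\\' → c ≠ q → stepB ⟨out, buf, inQ⟩ c = ⟨out ++ [c], buf, inQ⟩ := by
    rcases hq with ⟨rfl, rfl, rfl⟩ | ⟨rfl, rfl, rfl⟩ <;> intro out buf c hc1 hc2 <;>
      simp [stepB, hc1, hc2]
  have hstepBack : ∀ out buf, stepB ⟨out, buf, inQ⟩ '\\' = ⟨out ++ ['\\'], buf, escQ⟩ := by
    rcases hq with ⟨rfl, rfl, rfl⟩ | ⟨rfl, rfl, rfl⟩ <;> intro out buf <;> rfl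
  have hstepQ : ∀ out buf, stepB ⟨out, buf, inQ⟩ q = ⟨out ++ [q], buf, .code⟩ := by
    rcases hq with ⟨rfl, rfl, rfl⟩ | ⟨rfl, rfl, rfl⟩ <;> intro out buf <;> rfl
  suffices H : ∀ (n : Nat) (l out buf : List Char), l.length ≤ n →
      (l.length ≤ splitQ q l ∧ ∃ st', (st' = inQ ∨ st' = escQ) ∧
          List.foldl stepB ⟨out, buf, inQ⟩ l = ⟨out ++ l, buf, st'⟩)
      ∨ (List.foldl stepB ⟨out, buf, inQ⟩ l
          = List.foldl stepB ⟨out ++ l.take (splitQ q l), buf, .code⟩ (l.drop (splitQ q l))) by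
    intro l out buf
    exact H l.length l out buf le_rfl
  intro n
  induction n with
  | zero =>
    intro l out buf hn
    have : l = [] := List.eq_nil_of_length_eq_zero (by omega)
    subst this
    exact Or.inl ⟨by simp [splitQ], inQ, Or.inl rfl, by simp⟩
  | succ n ih =>
    intro l out buf hn
    match l with
    | [] => exact Or.inl ⟨by simp [splitQ], inQ, Or.inl rfl, by simp⟩
    | c :: l =>
      by_cases hc : c = '\\'
      · subst hc
        match l with
        | [] =>
          refine Or.inl ⟨by simp [splitQ], escQ, Or.inr rfl, ?_⟩
          simp [hstepBack]
        | d :: l =>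
          have hfold : List.foldl stepB ⟨out, buf, inQ⟩ ('\\' :: d :: l)
              = List.foldl stepB ⟨out ++ ['\\', d], buf, inQ⟩ l := by
            simp only [List.foldl_cons, hstepBack, hstepEsc]
            simp
          have hsp : splitQ q ('\\' :: d :: l) = 2 + splitQ q l := splitQ_bs_cons q d l
          rcases ih l (out ++ ['\\', d]) buf (by simp at hn ⊢; omega) with ⟨h1, st', h2, h3⟩ | hr
          · refine Or.inl ⟨by simp [hsp]; omega, st', h2, ?_⟩
            rw [hfold, h3]
            simp
          · refine Or.inr ?_
            rw [hfold, hr, hsp]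
            have ht : ('\\' :: d :: l).take (2 + splitQ q l) = '\\' :: d :: l.take (splitQ q l) := by
              rw [show 2 + splitQ q l = splitQ q l + 1 + 1 by omega]
              simp [List.take_succ_cons]
            have hdr : ('\\' :: d :: l).drop (2 + splitQ q l) = l.drop (splitQ q l) := by
              rw [show 2 + splitQ q l = splitQ q l + 1 + 1 by omega]
              simp [List.drop_succ_cons]
            rw [ht, hdr]
            simp
      · by_cases hcq : c = q
        · refine Or.inr ?_
          have hsp : splitQ q (c :: l) = 1 := by rw [hcq]; exact splitQ_quote q l hq'
          rw [hsp]
          simp only [List.foldl_cons, List.take_succ_cons, List.take_zero,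
            List.drop_succ_cons, List.drop_zero]
          rw [hcq, hstepQ]
        · have hfold : List.foldl stepB ⟨out, buf, inQ⟩ (c :: l)
              = List.foldl stepB ⟨out ++ [c], buf, inQ⟩ l := by
            simp only [List.foldl_cons, hstepIn out buf c hc hcq]
          have hsp : splitQ q (c :: l) = 1 + splitQ q l := splitQ_other q c l hc hcq
          rcases ih l (out ++ [c]) buf (by simp at hn ⊢; omega) with ⟨h1, st', h2, h3⟩ | hr
          · refine Or.inl ⟨by simp [hsp]; omega, st', h2, ?_⟩
            rw [hfold, h3]
            simp
          · refine Or.inr ?_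
            rw [hfold, hr, hsp]
            have ht : (c :: l).take (1 + splitQ q l) = c :: l.take (splitQ q l) := by
              rw [show 1 + splitQ q l = splitQ q l + 1 by omega]
              simp [List.take_succ_cons]
            have hdr : (c :: l).drop (1 + splitQ q l) = l.drop (splitQ q l) := by
              rw [show 1 + splitQ q l = splitQ q l + 1 by omega]
              simp [List.drop_succ_cons]
            rw [ht, hdr]
            simp

theorem mem_singleton_infix {x : Char} {l : List Char} (hx : x ∈ l) : [x] <:+: l := by
  obtain ⟨s, t, rfl⟩ := List.mem_iff_append.mp hx
  exact ⟨s, t, by simp⟩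

theorem tail_drop_cons (src : List Char) (i : Nat) (c : Char) (l : List Char)
    (h : src.drop i = c :: l) : src.drop (i + 1) = l := by
  have := congrArg List.tail h
  simpa [List.tail_drop] using this

theorem master (src : List Char) (k : Nat) : ∀ i (out buf : List Char), src.length - i ≤ k →
    finishB (List.foldl stepB ⟨out, buf, .code⟩ (src.drop i)) =
      out ++ (goA src i []).flatten := by
  induction k with
  | zero =>
    intro i out buf h
    rw [List.drop_eq_nil_of_le (by omega), goA, dif_neg (by omega)]
    simp [finishB]
  | succ k ih =>
    intro i out buf h
    by_cases hi : i < src.length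
    swap
    · rw [List.drop_eq_nil_of_le (by omega), goA, dif_neg hi]
      simp [finishB]
    have hcast : ((i : Int) + 2) = ((i + 2 : Nat) : Int) := by push_cast; ring
    conv_rhs => rw [goA]
    rw [dif_pos hi]
    by_cases hb : PySem.Chars.slice src (some (i : Int)) (some ((i : Int) + 2)) = ['/', '*']
    · -- 块注释
      obtain ⟨h2, hdi⟩ := slice2 src i '/' '*' hb
      simp only [dif_pos hb]
      rw [hdi]
      simp only [List.foldl_cons]
      have s1 : stepB ⟨out, buf, .code⟩ '/' = ⟨out, buf, .slash⟩ := rfl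
      have s2 : stepB ⟨out, buf, .slash⟩ '*' = ⟨out ++ ['/', '*'], buf, .block⟩ := rfl
      rw [s1, s2]
      by_cases he : PySem.Chars.findFrom src ['*', '/'] ((i : Int) + 2) none = -1
      · rw [dif_pos he]
        have hni : ¬ ['*', '/'] <:+: src.drop (i + 2) :=
          findFrom_not_found src ['*', '/'] (i + 2) h2 (by rw [← hcast]; exact he)
        obtain ⟨st', hst', hfold⟩ := blockRun (src.drop (i + 2)) (out ++ ['/', '*']) buf .block
          (Or.inl ⟨rfl, hni⟩)
        rw [hfold]
        rcases hst' with rfl | rfl <;> simp [finishB]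
      · have hf := findFrom_found src ['*', '/'] (i + 2) h2 (by rw [← hcast]; exact he)
          (PySem.Chars.findFrom src ['*', '/'] ((i : Int) + 2) none).toNat (by rw [hcast])
        obtain ⟨hm1, hm2, hdropm, hmin⟩ := hf
        set m := (PySem.Chars.findFrom src ['*', '/'] ((i : Int) + 2) none).toNat with hmdef
        simp only [List.length_cons] at hm2
        have hmlen : m + 2 ≤ src.length := by simpa using hm2
        set mid := (src.drop (i + 2)).take (m - (i + 2)) with hmid
        have hsplit : src.drop (i + 2) = mid ++ '*' :: '/' :: src.drop (m + 2) := by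
          conv_lhs => rw [← List.take_append_drop (m - (i + 2)) (src.drop (i + 2))]
          rw [List.drop_drop, show i + 2 + (m - (i + 2)) = m by omega]
          rw [hdropm, ← hmid]
          simp
        have hni : ¬ ['*', '/'] <:+: mid :=
          no_infix_take ['*', '/'] src (i + 2) m hmin (by decide)
        rw [dif_neg he, hsplit]
        rw [List.foldl_append]
        obtain ⟨st', hst', hfold⟩ := blockRun mid (out ++ ['/', '*']) buf .block
          (Or.inl ⟨rfl, hni⟩)
        rw [hfold]
        simp only [List.foldl_cons]
        have s3 : stepB ⟨out ++ ['/', '*'] ++ mid, buf, st'⟩ '*'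
            = ⟨out ++ ['/', '*'] ++ mid ++ ['*'], buf, .blockStar⟩ := by
          rcases hst' with rfl | rfl <;> rfl
        have s4 : stepB ⟨out ++ ['/', '*'] ++ mid ++ ['*'], buf, .blockStar⟩ '/'
            = ⟨out ++ ['/', '*'] ++ mid ++ ['*'] ++ ['/'], buf, .code⟩ := rfl
        rw [s3, s4, ih (m + 2) _ buf (by omega)]
        conv_rhs => rw [goA_acc]
        have hchunk : PySem.Chars.slice src (some (i : Int))
            (some (PySem.Chars.findFrom src ['*', '/'] ((i : Int) + 2) none + 2))
            = '/' :: '*' :: mid ++ ['*', '/'] := by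
          have hcast2 : PySem.Chars.findFrom src ['*', '/'] ((i : Int) + 2) none + 2
              = ((m + 2 : Nat) : Int) := by
            have hnn : (0 : Int) ≤ PySem.Chars.findFrom src ['*', '/'] ((i : Int) + 2) none := by
              rw [hcast, PySem.Chars.findFrom_natCast src ['*', '/'] (i + 2) h2] at he ⊢
              by_cases hq0 : PySem.Chars.find (src.drop (i + 2)) ['*', '/'] = -1
              · rw [if_pos hq0] at he
                exact absurd rfl he
              · rw [if_neg hq0]
                have h6 := PySem.Chars.neg_one_le_find (s := src.drop (i + 2)) (sub := ['*', '/'])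
                push_cast
                omega
            push_cast
            omega
          rw [PySem.Chars.slice_eq_listSlice, hcast2, PySem.List.slice_natCast, hdi]
          have hmidlen : mid.length = m - (i + 2) := by
            rw [hmid]
            simp [List.length_take, List.length_drop]
            omega
          rw [show m + 2 - i = (m - i) + 2 by omega]
          simp only [List.take_succ_cons]
          rw [hsplit, List.take_append, hmidlen,
            List.take_of_length_le (by rw [hmidlen]; omega),
            show m - i - (m - (i + 2)) = 2 by omega]
          simp
        rw [hchunk]
        simp
    · simp only [dif_neg hb]
      have hdi : src.drop i = src[i] :: src.drop (i + 1) := List.drop_eq_getElem_cons hi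
      by_cases hq : src[i] = '"'
      · -- 字符串字面量
        simp only [if_pos hq]
        rw [hdi, hq]
        simp only [List.foldl_cons]
        have s1 : stepB ⟨out, buf, .code⟩ '"' = ⟨out ++ ['"'], buf, .instr⟩ := rfl
        rw [s1]
        have hscan := scanQuote_eq src '"' src.length (i + 1) (by omega)
        set c := splitQ '"' (src.drop (i + 1)) with hcdef
        have hchunk : PySem.Chars.slice src (some (i : Int))
            (some ((scanQuote src '"' (i + 1) : Nat) : Int))
            = '"' :: (src.drop (i + 1)).take c := by
          rw [PySem.Chars.slice_eq_listSlice, PySem.List.slice_natCast, hdi, hq, hscan,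
            show i + 1 + c - i = c + 1 by omega]
          simp [List.take_succ_cons]
        rcases qRun '"' .instr .strEsc (Or.inl ⟨rfl, rfl, rfl⟩) (src.drop (i + 1))
            (out ++ ['"']) buf with ⟨h1, st', hst', hfold⟩ | hfold
        · rw [hfold]
          conv_rhs => rw [goA_acc]
          rw [hchunk]
          have hjlen : src.length ≤ scanQuote src '"' (i + 1) := by
            rw [hscan]
            simp [List.length_drop] at h1
            omega
          rw [goA, dif_neg (by omega)]
          have hfin : ∀ o b, st' = BSt.instr ∨ st' = BSt.strEsc →
              finishB ⟨o, b, st'⟩ = o := by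
            intro o b hs
            rcases hs with rfl | rfl <;> rfl
          rw [hfin _ _ hst', List.take_of_length_le (by simp [List.length_drop] at h1 ⊢; omega)]
          simp
        · rw [← hcdef] at hfold
          rw [hfold, List.drop_drop, ih (i + 1 + c) _ buf (by omega)]
          conv_rhs => rw [goA_acc]
          rw [hchunk, hscan]
          simp
      · simp only [if_neg hq]
        by_cases hq' : src[i] = '\''
        · -- 字符常量
          simp only [if_pos hq']
          rw [hdi, hq']
          simp only [List.foldl_cons]
          have s1 : stepB ⟨out, buf, .code⟩ '\'' = ⟨out ++ ['\''], buf, .inchr⟩ := rfl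
          rw [s1]
          have hscan := scanQuote_eq src '\'' src.length (i + 1) (by omega)
          set c := splitQ '\'' (src.drop (i + 1)) with hcdef
          have hchunk : PySem.Chars.slice src (some (i : Int))
              (some ((scanQuote src '\'' (i + 1) : Nat) : Int))
              = '\'' :: (src.drop (i + 1)).take c := by
            rw [PySem.Chars.slice_eq_listSlice, PySem.List.slice_natCast, hdi, hq', hscan,
              show i + 1 + c - i = c + 1 by omega]
            simp [List.take_succ_cons]
          rcases qRun '\'' .inchr .chrEsc (Or.inr ⟨rfl, rfl, rfl⟩) (src.drop (i + 1))
              (out ++ ['\'']) buf with ⟨h1, st', hst', hfold⟩ | hfold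
          · rw [hfold]
            conv_rhs => rw [goA_acc]
            rw [hchunk]
            have hjlen : src.length ≤ scanQuote src '\'' (i + 1) := by
              rw [hscan]
              simp [List.length_drop] at h1
              omega
            rw [goA, dif_neg (by omega)]
            have hfin : ∀ o b, st' = BSt.inchr ∨ st' = BSt.chrEsc →
                finishB ⟨o, b, st'⟩ = o := by
              intro o b hs
              rcases hs with rfl | rfl <;> rfl
            rw [hfin _ _ hst', List.take_of_length_le (by simp [List.length_drop] at h1 ⊢; omega)]
            simp
          · rw [← hcdef] at hfold
            rw [hfold, List.drop_drop, ih (i + 1 + c) _ buf (by omega)]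
            conv_rhs => rw [goA_acc]
            rw [hchunk, hscan]
            simp
        · simp only [if_neg hq']
          by_cases hl : PySem.Chars.slice src (some (i : Int)) (some ((i : Int) + 2)) = ['/', '/']
          · -- 单行注释
            obtain ⟨h2, hdi2⟩ := slice2 src i '/' '/' hl
            simp only [dif_pos hl]
            rw [hdi2]
            simp only [List.foldl_cons]
            have s1 : stepB ⟨out, buf, .code⟩ '/' = ⟨out, buf, .slash⟩ := rfl
            have s2 : stepB ⟨out, buf, .slash⟩ '/' = ⟨out, [], .line⟩ := rfl
            rw [s1, s2]
            by_cases he : PySem.Chars.findFrom src ['\n'] (i : Int) none = -1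
            · have hni : ¬ ['\n'] <:+: src.drop i :=
                findFrom_not_found src ['\n'] i (by omega) he
              have hnm : '\n' ∉ src.drop (i + 2) := by
                intro hmem
                exact hni (mem_singleton_infix (by rw [hdi2]; right; right; exact hmem))
              rw [lineRun (src.drop (i + 2)) hnm out []]
              have hsl : PySem.List.slice src (some ((i : Int) + 2)) none = src.drop (i + 2) := by
                rw [hcast, PySem.List.slice_from_natCast]
              simp [finishB, emitLine, he, hsl]
            · have hf := findFrom_found src ['\n'] i (by omega) he
                (PySem.Chars.findFrom src ['\n'] (i : Int) none).toNat rfl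
              obtain ⟨hm1, hm2, hdropm, hmin⟩ := hf
              set m := (PySem.Chars.findFrom src ['\n'] (i : Int) none).toNat with hmdef
              simp only [List.length_cons, List.length_nil] at hm2
              have hdi1 : src.drop (i + 1) = '/' :: src.drop (i + 2) := tail_drop_cons src i '/' _ hdi2
              have hsm : src[m]? = some '\n' := by
                rw [← List.head?_drop, hdropm]; rfl
              have hm3 : i + 2 ≤ m := by
                by_contra hcon
                rcases (by omega : m = i ∨ m = i + 1) with hc1 | hc1
                · rw [hc1, ← List.head?_drop, hdi2] at hsm
                  simp at hsm
                · rw [hc1, ← List.head?_drop, hdi1] at hsm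
                  simp at hsm
              set body := (src.drop (i + 2)).take (m - (i + 2)) with hbody
              have hsplit : src.drop (i + 2) = body ++ '\n' :: src.drop (m + 1) := by
                conv_lhs => rw [← List.take_append_drop (m - (i + 2)) (src.drop (i + 2))]
                rw [List.drop_drop, show i + 2 + (m - (i + 2)) = m by omega, hdropm, ← hbody]
                simp
              have hnm : '\n' ∉ body := by
                intro hmem
                exact no_infix_take ['\n'] src (i + 2) m
                  (fun j hj1 hj2 => hmin j (by omega) hj2) (by decide)
                  (mem_singleton_infix hmem)
              rw [hsplit, List.foldl_append, lineRun body hnm out []]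
              simp only [List.foldl_cons]
              have s3 : stepB ⟨out, [] ++ body, .line⟩ '\n'
                  = ⟨out ++ emitLine ([] ++ body) ++ ['\n'], [] ++ body, .code⟩ := rfl
              rw [s3, ih (m + 1) _ _ (by omega)]
              have hne : ¬ PySem.Chars.findFrom src ['\n'] (i : Int) none = -1 := he
              simp only [dif_pos hne, if_pos hne]
              conv_rhs => rw [goA_acc]
              have hslice : PySem.Chars.slice src (some ((i : Int) + 2))
                  (some (PySem.Chars.findFrom src ['\n'] (i : Int) none)) = body := by
                have hcast2 : PySem.Chars.findFrom src ['\n'] (i : Int) none = ((m : Nat) : Int) := by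
                  have hnn : (0 : Int) ≤ PySem.Chars.findFrom src ['\n'] (i : Int) none := by
                    rw [PySem.Chars.findFrom_natCast src ['\n'] i (by omega)] at he ⊢
                    by_cases hq0 : PySem.Chars.find (src.drop i) ['\n'] = -1
                    · rw [if_pos hq0] at he
                      exact absurd rfl he
                    · rw [if_neg hq0]
                      have h6 := PySem.Chars.neg_one_le_find (s := src.drop i) (sub := ['\n'])
                      omega
                  omega
                rw [PySem.Chars.slice_eq_listSlice, hcast2, hcast, PySem.List.slice_natCast]
              rw [hslice]
              simp [emitLine]
          · -- 其他字符
            simp only [dif_neg hl]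
            rw [hdi]
            by_cases hcs : src[i] = '/'
            · rcases hrest : src.drop (i + 1) with _ | ⟨d, rest'⟩
              · have hlen : src.length ≤ i + 1 := by
                  have := congrArg List.length hrest
                  simp [List.length_drop] at this
                  omega
                simp only [List.foldl_cons, List.foldl_nil]
                rw [hcs]
                have s1 : stepB ⟨out, buf, .code⟩ '/' = ⟨out, buf, .slash⟩ := rfl
                rw [s1]
                conv_rhs => rw [goA_acc]
                rw [goA, dif_neg (by omega)]
                simp [finishB]
              · have hslice2 : PySem.Chars.slice src (some (i : Int)) (some ((i : Int) + 2))
                    = ['/', d] := by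
                  rw [PySem.Chars.slice_eq_listSlice, hcast, PySem.List.slice_natCast, hdi, hcs,
                    hrest, show i + 2 - i = 2 by omega]
                  simp
                have hd1 : d ≠ '*' := fun hd => hb (by rw [hslice2, hd])
                have hd2 : d ≠ '/' := fun hd => hl (by rw [hslice2, hd])
                rw [hcs]
                simp only [List.foldl_cons]
                have s1 : stepB ⟨out, buf, .code⟩ '/' = ⟨out, buf, .slash⟩ := rfl
                have s2 : stepB ⟨out, buf, .slash⟩ d = stepB ⟨out ++ ['/'], buf, .code⟩ d := by
                  simp [stepB, codeStep, hd1, hd2]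
                rw [s1, s2, show List.foldl stepB (stepB ⟨out ++ ['/'], buf, .code⟩ d) rest'
                    = List.foldl stepB ⟨out ++ ['/'], buf, .code⟩ (d :: rest') from rfl,
                  ← hrest, ih (i + 1) _ buf (by omega)]
                conv_rhs => rw [goA_acc]
                simp
            · have s1 : stepB ⟨out, buf, .code⟩ src[i] = ⟨out ++ [src[i]], buf, .code⟩ := by
                simp [stepB, codeStep, hcs, hq, hq']
              simp only [List.foldl_cons]
              rw [s1, ih (i + 1) _ buf (by omega)]
              conv_rhs => rw [goA_acc]
              simp

-- ===== VERDICT (by name: the statement is the Claim_ definition above) =====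
theorem convert_line_comments_spec : Claim_equal_convert_line_comments := by
  intro src _
  unfold Spec_convert_line_comments convert_line_comments convert_line_comments_alt
  rw [join_nil_eq_flatten]
  have h := master src.toList src.toList.length 0 [] [] (by omega)
  simp only [List.drop_zero, List.nil_append] at h
  rw [h]
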